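-- pv_equiv track=rewrite | github.com/daniel-reich/turbo-robot | Pf2kDoCRvEL8qzKTs_6.py | order_people
-- ===== SOURCE A (Python) =====
-- def order_people(size,queue):
--     final = []
--     count = size[0] * size[1]
--     #people = [x in range(1,queue+1)]
--     row_count = 0
--     column_count = 0
--     index = 1
--     if queue > count:
--         return "overcrowded"
--     if count >= queue:
--
--         for row in range(1,size[0]+1):
--             #if index <= queue:
--                 x = []
--
--                 if row_count % 2 == 0:
--                     for item in range(0,size[1]):
--                         if index <= queue:
--                             x.append(index)
--                         else:
--                             x.append(0)
--                         index += 1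
--                     final.append(x)
--                         #column_count = size[1]
--                     x = []
--                 if row_count % 2 != 0:
--                     sub_index = index + size[1] -1
--                     for item in range(0,size[1]):
--                         if sub_index <= queue:
--                             x.append(sub_index)
--                         else:
--                             x.append(0)
--                         sub_index -= 1
--                     final.append(x)
--                     index += size[1]
--                     x = []
--                         #column_count = 0
--                 row_count += 1
--
--
--         return final
-- ===== SOURCE B (Python) =====
-- def order_people(size, queue):
--     rows, cols = size[0], size[1]
--     count = rows * cols
--     if queue > count:
--         return "overcrowded"
--     cells = max(rows, 0) * max(cols, 0)
--     vals = [n if n <= queue else 0 for n in range(1, cells + 1)]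
--     grid = []
--     for r in range(rows):
--         chunk = vals[r * cols:(r + 1) * cols]
--         grid.append(chunk[::-1] if r % 2 else chunk)
--     return grid
-- ===== Notes on version B (the rewrite author's own statement) =====
-- stated objective: simpler
-- what changed: A's per-cell zigzag bookkeeping (row_count, running index, descending sub_index) is replaced by one linear fill of the values 1..count (0 past the queue) followed by a reshape pass that slices consecutive chunks of size[1] and reverses the odd-indexed chunks.
-- outside the precondition, e.g. on order_people([2, 3], 10): A returns 'overcrowded', B returns 'overcrowded'
import Mathlib
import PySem

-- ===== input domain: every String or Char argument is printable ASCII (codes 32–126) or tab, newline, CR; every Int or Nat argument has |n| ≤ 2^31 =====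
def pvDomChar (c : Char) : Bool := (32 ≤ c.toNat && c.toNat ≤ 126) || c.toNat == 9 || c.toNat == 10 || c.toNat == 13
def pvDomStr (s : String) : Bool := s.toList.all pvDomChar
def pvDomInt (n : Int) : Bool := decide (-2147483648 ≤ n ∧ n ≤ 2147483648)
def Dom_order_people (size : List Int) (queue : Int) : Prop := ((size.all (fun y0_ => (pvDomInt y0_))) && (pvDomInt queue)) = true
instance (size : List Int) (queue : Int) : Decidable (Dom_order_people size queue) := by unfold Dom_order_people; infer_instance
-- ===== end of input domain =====

-- B replaces A's per-cell zigzag index bookkeeping by a linear fill of the values 1..count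
-- followed by a reshape pass (chunks of size[1]; odd-indexed chunks reversed); objective: simpler.

-- ===== PORT A =====
-- A's row-loop body as a named helper: state is (final, row_count, index).
def opStep (queue c : Int) (st : List (List Int) × Int × Int) (_row : Int) : List (List Int) × Int × Int :=
  if PySem.Int.mod st.2.1 2 == 0 then
    let p := (PySem.List.pyRange 0 c 1).foldl
      (fun (p : List Int × Int) _ => (p.1 ++ [if p.2 ≤ queue then p.2 else 0], p.2 + 1))
      ([], st.2.2)
    (st.1 ++ [p.1], st.2.1 + 1, p.2)
  else
    let p := (PySem.List.pyRange 0 c 1).foldl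
      (fun (p : List Int × Int) _ => (p.1 ++ [if p.2 ≤ queue then p.2 else 0], p.2 - 1))
      ([], st.2.2 + c - 1)
    (st.1 ++ [p.1], st.2.1 + 1, st.2.2 + c)

def order_people (size : List Int) (queue : Int) : List (List Int) :=
  match PySem.List.pyGet? size 0, PySem.List.pyGet? size 1 with
  | some s0, some s1 =>
    if queue > s0 * s1 then []   -- Python returns the STRING "overcrowded" here; outside Pre_
    else ((PySem.List.pyRange 1 (s0 + 1) 1).foldl (opStep queue s1) ([], 0, 1)).1
  | _, _ => []                   -- Python raises IndexError here; outside Pre_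

-- ===== PORT B =====
def order_people_alt (size : List Int) (queue : Int) : List (List Int) :=
  match PySem.List.pyGet? size 0 with
  | none => []                       -- Python raises IndexError here; outside Pre_
  | some rows =>
    match PySem.List.pyGet? size 1 with
    | none => []                     -- Python raises IndexError here; outside Pre_
    | some cols =>
      if queue > rows * cols then [] -- Python returns the STRING "overcrowded" here; outside Pre_
      else
        let vals := (PySem.List.pyRange 1 (max rows 0 * max cols 0 + 1) 1).map
          (fun n => if n ≤ queue then n else 0)
        (PySem.List.pyRange 0 rows 1).map (fun r =>
          let chunk := PySem.List.slice vals (some (r * cols)) (some ((r + 1) * cols))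
          if PySem.Int.mod r 2 == 0 then chunk else chunk.reverse)

-- ===== PRECONDITION & SPEC =====
-- Pre_ excludes size lists with fewer than 2 elements (A raises IndexError) and inputs with
-- queue > size[0]*size[1], where A returns the string 'overcrowded' — not a list of lists.
def Pre_order_people (size : List Int) (queue : Int) : Prop :=
  2 ≤ size.length ∧ queue ≤ size.getD 0 0 * size.getD 1 0
instance (size : List Int) (queue : Int) : Decidable (Pre_order_people size queue) := by
  unfold Pre_order_people; infer_instance
def pvWitness_order_people : List Int × Int := ([3, 4], 7)

def Spec_order_people (size : List Int) (queue : Int) (out : List (List Int)) : Prop := out = order_people_alt size queue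
instance (size : List Int) (queue : Int) (out : List (List Int)) : Decidable (Spec_order_people size queue out) := by unfold Spec_order_people; infer_instance

-- ===== CLAIM (what is proved, stated in full; the proofs are below) =====
def Claim_equal_order_people : Prop := ∀ (size : List Int) (queue : Int), Dom_order_people size queue → Pre_order_people size queue → Spec_order_people size queue (order_people size queue)

-- ===== LEMMAS AND PROOFS =====

-- the value written in reading-order cell number n (1-based)
def pvCell (queue n : Int) : Int := if n ≤ queue then n else 0

-- one output row: ascending chunk of width c' starting at base, reversed on odd row index r
def pvRow (queue : Int) (c' : Nat) (base : Int) (r : Nat) : List Int :=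
  if r % 2 = 0 then (List.range c').map (fun j : Nat => pvCell queue (base + (j : Int)))
  else ((List.range c').map (fun j : Nat => pvCell queue (base + (j : Int)))).reverse

lemma foldl_asc (queue : Int) (l : List Int) (acc : List Int) (idx : Int) :
    l.foldl (fun (p : List Int × Int) _ => (p.1 ++ [if p.2 ≤ queue then p.2 else 0], p.2 + 1)) (acc, idx)
      = (acc ++ (List.range l.length).map (fun j : Nat => pvCell queue (idx + (j : Int))), idx + l.length) := by
  induction l generalizing acc idx with
  | nil => simp
  | cons h t ih =>
    simp only [List.foldl_cons, ih, List.length_cons, List.range_succ_eq_map, List.map_cons, List.map_map]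
    refine Prod.ext ?_ ?_
    · simp only [Nat.cast_zero, add_zero, List.append_assoc, List.singleton_append]
      congr 1
      refine List.cons_eq_cons.mpr ⟨rfl, ?_⟩
      apply List.map_congr_left
      intro a _
      simp only [Function.comp, pvCell]
      have e : idx + ((a:Nat)+1 : Nat) = idx + 1 + (a : Int) := by push_cast; ring
      rw [e]
    · simp only []
      push_cast
      ring

lemma foldl_desc (queue : Int) (l : List Int) (acc : List Int) (idx : Int) :
    l.foldl (fun (p : List Int × Int) _ => (p.1 ++ [if p.2 ≤ queue then p.2 else 0], p.2 - 1)) (acc, idx)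
      = (acc ++ (List.range l.length).map (fun j : Nat => pvCell queue (idx - (j : Int))), idx - l.length) := by
  induction l generalizing acc idx with
  | nil => simp
  | cons h t ih =>
    simp only [List.foldl_cons, ih, List.length_cons, List.range_succ_eq_map, List.map_cons, List.map_map]
    refine Prod.ext ?_ ?_
    · simp only [Nat.cast_zero, sub_zero, List.append_assoc, List.singleton_append]
      congr 1
      refine List.cons_eq_cons.mpr ⟨rfl, ?_⟩
      apply List.map_congr_left
      intro a _
      simp only [Function.comp, pvCell]
      have e : idx - ((a:Nat)+1 : Nat) = idx - 1 - (a : Int) := by push_cast; ring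
      rw [e]
    · simp only []
      push_cast
      ring

lemma rev_map_range {α : Type} (u : Nat → α) (n : Nat) :
    ((List.range n).map u).reverse = (List.range n).map (fun j => u (n - 1 - j)) := by
  apply List.ext_getElem
  · simp
  · intro i h1 h2
    simp only [List.length_reverse, List.length_map, List.length_range] at h1
    rw [List.getElem_reverse]
    simp only [List.getElem_map, List.getElem_range, List.length_map, List.length_range]

lemma mod_two_cast (k : Nat) : PySem.Int.mod (k : Int) 2 = ((k % 2 : Nat) : Int) := by
  exact_mod_cast PySem.Int.mod_natCast k 2

lemma slice_nil (a b : Int) : PySem.List.slice ([] : List Int) (some a) (some b) = [] := by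
  apply List.eq_nil_of_length_eq_zero
  rw [PySem.List.length_slice]
  simp only [List.length_nil]
  have h1 := PySem.List.clampIdx_le 0 b
  have h2 := PySem.List.clampIdx_le 0 a
  omega

lemma chunk_eq (u : Nat → Int) (a' c' k : Nat) (hk : k < a') :
    ((((List.range (a' * c')).map u).drop (k * c')).take c')
      = (List.range c').map (fun j => u (k * c' + j)) := by
  have hle : k * c' + c' ≤ a' * c' := by
    have h2 : (k + 1) * c' ≤ a' * c' := Nat.mul_le_mul_right c' hk
    have h3 : (k + 1) * c' = k * c' + c' := by ring
    omega
  apply List.ext_getElem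
  · simp; omega
  · intro i h1 h2
    simp only [List.length_take, List.length_drop, List.length_map, List.length_range] at h1
    rw [List.getElem_take, List.getElem_drop]
    simp only [List.getElem_map, List.getElem_range]

lemma foldl_step_nil (queue c : Int) (hc : c ≤ 0) (L : List Int)
    (acc : List (List Int)) (rc idx : Int) :
    (L.foldl (opStep queue c) (acc, rc, idx)).1 = acc ++ List.replicate L.length [] := by
  induction L generalizing acc rc idx with
  | nil => simp
  | cons h t ih =>
    simp only [List.foldl_cons, opStep, PySem.List.pyRange_one_eq_nil (by omega : c ≤ 0),
      List.foldl_nil]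
    split <;>
      simp [ih, List.replicate_succ, List.append_assoc]

lemma foldl_step_pos (queue c : Int) (hc : 0 < c) (L : List Int)
    (acc : List (List Int)) (rc : Nat) (idx : Int) :
    (L.foldl (opStep queue c) (acc, (rc : Int), idx)).1
      = acc ++ (List.range L.length).map (fun r : Nat => pvRow queue c.toNat (idx + (r : Int) * c) (rc + r)) := by
  have hcc : ((c.toNat : Nat) : Int) = c := Int.toNat_of_nonneg (le_of_lt hc)
  have hlen : (PySem.List.pyRange 0 c 1).length = c.toNat := by
    rw [PySem.List.length_pyRange_one]; omega
  induction L generalizing acc rc idx with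
  | nil => simp
  | cons h t ih =>
    simp only [List.foldl_cons, opStep, mod_two_cast]
    by_cases hr : rc % 2 = 0
    · rw [if_pos (by simp [hr])]
      simp only [foldl_asc, hlen]
      have hcast : ((rc : Int) + 1) = ((rc + 1 : Nat) : Int) := by push_cast; ring
      rw [hcast, ih]
      simp only [List.length_cons, List.range_succ_eq_map, List.map_cons, List.map_map,
        List.append_assoc, List.singleton_append, List.nil_append]
      congr 1
      refine List.cons_eq_cons.mpr ⟨?_, ?_⟩
      · simp only [pvRow]
        rw [if_pos (by omega : (rc + 0) % 2 = 0)]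
        simp
      · apply List.map_congr_left
        intro r _
        simp only [Function.comp]
        have h1 : idx + (c.toNat : Int) + (r : Int) * c = idx + ((r + 1 : Nat) : Int) * c := by
          push_cast; rw [hcc]; ring
        rw [h1]
        simp only [Nat.succ_eq_add_one]
        congr 1
        omega
    · rw [if_neg (by simp; omega)]
      simp only [foldl_desc, hlen]
      have hcast : ((rc : Int) + 1) = ((rc + 1 : Nat) : Int) := by push_cast; ring
      rw [hcast, ih]
      simp only [List.length_cons, List.range_succ_eq_map, List.map_cons, List.map_map,
        List.append_assoc, List.singleton_append, List.nil_append]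
      congr 1
      refine List.cons_eq_cons.mpr ⟨?_, ?_⟩
      · simp only [pvRow]
        rw [if_neg (by omega : ¬ (rc + 0) % 2 = 0), rev_map_range]
        apply List.map_congr_left
        intro j hj
        simp only [List.mem_range] at hj
        congr 1
        omega
      · apply List.map_congr_left
        intro r _
        simp only [Function.comp]
        have h1 : idx + c + (r : Int) * c = idx + ((r + 1 : Nat) : Int) * c := by
          push_cast; ring
        rw [h1]
        simp only [Nat.succ_eq_add_one]
        congr 1
        omega

-- ===== VERDICT (by name: the statement is the Claim_ definition above) =====
theorem order_people_spec : Claim_equal_order_people := by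
  intro size queue _hdom hpre
  unfold Spec_order_people
  obtain ⟨hlen, hq⟩ := hpre
  match size with
  | s0 :: s1 :: rest =>
    have h0 : PySem.List.pyGet? (s0 :: s1 :: rest) 0 = some s0 := by
      simp [pysem]
    have h1 : PySem.List.pyGet? (s0 :: s1 :: rest) 1 = some s1 := by
      simp [pysem]
    have hq' : queue ≤ s0 * s1 := by simpa using hq
    simp only [order_people, order_people_alt, h0, h1, if_neg (not_lt.mpr hq')]
    by_cases hs0 : s0 ≤ 0
    · rw [PySem.List.pyRange_one_eq_nil (by omega : s0 + 1 ≤ 1),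
        PySem.List.pyRange_one_eq_nil (by omega : s0 ≤ 0)]
      simp
    · push_neg at hs0
      have ha : ((s0.toNat : Nat) : Int) = s0 := Int.toNat_of_nonneg (le_of_lt hs0)
      by_cases hc : s1 ≤ 0
      · -- degenerate width: every row is empty on both sides
        rw [foldl_step_nil queue s1 hc]
        have hcount : max s0 0 * max s1 0 + 1 ≤ 1 := by
          rw [max_eq_right hc, mul_zero]
          omega
        rw [PySem.List.pyRange_one_eq_nil hcount]
        simp only [List.map_nil, List.nil_append]
        have hB : ∀ r ∈ PySem.List.pyRange 0 s0 1,
            (fun r : Int =>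
              if PySem.Int.mod r 2 == 0 then
                PySem.List.slice ([] : List Int) (some (r * s1)) (some ((r + 1) * s1))
              else (PySem.List.slice ([] : List Int) (some (r * s1)) (some ((r + 1) * s1))).reverse) r
              = (fun _ : Int => ([] : List Int)) r := by
          intro r _
          simp only []
          split <;> simp [slice_nil]
        rw [List.map_congr_left hB, List.map_const']
        rw [PySem.List.length_pyRange_one, PySem.List.length_pyRange_one]
        congr 1
        omega
      · push_neg at hc
        have hcc : ((s1.toNat : Nat) : Int) = s1 := Int.toNat_of_nonneg (le_of_lt hc)
        -- A side: rows are pvRow chunks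
        have hA := foldl_step_pos queue s1 hc (PySem.List.pyRange 1 (s0 + 1) 1) [] 0 1
        simp only [Nat.cast_zero] at hA
        rw [hA, List.nil_append, PySem.List.length_pyRange_one]
        have hlenA : (s0 + 1 - 1).toNat = s0.toNat := by omega
        rw [hlenA]
        -- B side: vals is the linear fill, rows are slices
        have hvals : PySem.List.pyRange 1 (max s0 0 * max s1 0 + 1) 1
            = (List.range (s0.toNat * s1.toNat)).map (fun k : Nat => 1 + (k : Int)) := by
          rw [max_eq_left hs0.le, max_eq_left hc.le]
          have hmul : s0 * s1 = ((s0.toNat * s1.toNat : Nat) : Int) := by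
            push_cast [ha, hcc]; ring
          have hN : (s0 * s1 + 1 - 1).toNat = s0.toNat * s1.toNat := by omega
          rw [PySem.List.pyRange_one, hN]
        rw [hvals, PySem.List.pyRange_one]
        have hlenB : (s0 - 0).toNat = s0.toNat := by omega
        rw [hlenB, List.map_map]
        apply List.map_congr_left
        intro k hk
        simp only [List.mem_range] at hk
        simp only [Function.comp, zero_add]
        have hsl : PySem.List.slice
            (((List.range (s0.toNat * s1.toNat)).map (fun k : Nat => (1 : Int) + (k : Int))).map
              (fun n => if n ≤ queue then n else 0))
            (some ((k : Int) * s1)) (some (((k : Int) + 1) * s1))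
            = (List.range s1.toNat).map
                (fun j : Nat => pvCell queue (1 + ((k * s1.toNat + j : Nat) : Int))) := by
          rw [List.map_map]
          have e1 : ((k : Int) * s1) = ((k * s1.toNat : Nat) : Int) := by push_cast [hcc]; ring
          have e2 : (((k : Int) + 1) * s1) = ((k * s1.toNat + s1.toNat : Nat) : Int) := by
            push_cast [hcc]; ring
          rw [e1, e2, PySem.List.slice_natCast]
          have e3 : k * s1.toNat + s1.toNat - k * s1.toNat = s1.toNat := by omega
          rw [e3, chunk_eq _ s0.toNat s1.toNat k hk]
          apply List.map_congr_left
          intro j _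
          simp [Function.comp, pvCell]
        rw [hsl, mod_two_cast k]
        simp only [pvRow]
        by_cases hk2 : k % 2 = 0
        · rw [if_pos hk2, if_pos (by simp [hk2])]
          apply List.map_congr_left
          intro j _
          congr 1
          push_cast [hcc]
          ring
        · rw [if_neg hk2, if_neg (by simp; omega)]
          congr 1
          apply List.map_congr_left
          intro j _
          congr 1
          push_cast [hcc]
          ring
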